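-- pv_equiv track=rewrite | github.com/joshanashakya/dissertation | workspace/dataset/java-python/GeeksForGeeks/3882/A/2.py | isPairWithDiff
-- ===== SOURCE A (Python) =====
-- N = 4
--
-- M = 4
--
-- def isPairWithDiff(mat, k):
--
--     # store elements in a hash
--     s = dict()
--
--     # store elements in dict
--     for i in range(N):
--         for j in range(M):
--             s[mat[i][j]] = 1
--
--     # looping through elements id present
--     # int the matrix return true
--     for i in range(N):
--         for j in range(M):
--             if k + mat[i][j] in s:
--                 return True
--
--     return False
-- ===== SOURCE B (Python) =====
-- N = 4
--
-- M = 4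
--
-- def isPairWithDiff(mat, k):
--     # Flatten the 4x4 window, then sort and sweep with two pointers for gap |k|.
--     vals = [mat[i][j] for i in range(N) for j in range(M)]
--     if k == 0:
--         return True
--     vals.sort()
--     target = abs(k)
--     n = len(vals)
--     i, j = 0, 1
--     while j < n:
--         d = vals[j] - vals[i]
--         if d == target:
--             return True
--         if d < target:
--             j += 1
--         else:
--             i += 1
--             if i == j:
--                 j += 1
--     return False
-- ===== Notes on version B (the rewrite author's own statement) =====
-- stated objective: alternative
-- what changed: Replaces A's hash-set build plus second membership scan with flattening the 4x4 window, an immediate True for k == 0, and a sort followed by a two-pointer sweep looking for a gap of abs(k).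
import Mathlib
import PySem

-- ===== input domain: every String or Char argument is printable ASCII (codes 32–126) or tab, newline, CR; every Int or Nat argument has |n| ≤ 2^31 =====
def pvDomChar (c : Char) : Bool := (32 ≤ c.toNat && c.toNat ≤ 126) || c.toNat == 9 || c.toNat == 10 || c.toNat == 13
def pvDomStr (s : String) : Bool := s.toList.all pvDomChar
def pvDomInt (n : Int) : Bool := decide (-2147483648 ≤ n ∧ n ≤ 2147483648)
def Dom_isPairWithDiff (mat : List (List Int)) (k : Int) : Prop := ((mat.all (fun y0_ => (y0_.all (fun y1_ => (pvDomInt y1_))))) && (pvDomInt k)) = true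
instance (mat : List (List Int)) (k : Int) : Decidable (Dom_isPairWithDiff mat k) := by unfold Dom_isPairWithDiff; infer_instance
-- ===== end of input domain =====

-- B replaces A's dict-build + membership rescan with sort and a two-pointer sweep for gap |k| (alternative decomposition, same exact result).

-- ===== PORT A =====
-- the 16 accesses mat[i][j], i,j over range(4), row-major; none = IndexError (excluded by Pre_)
def pvCellsA? (mat : List (List Int)) : Option (List Int) :=
  ((PySem.List.pyRange 0 4 1).mapM (fun i =>
    (PySem.List.pyGet? mat i).bind (fun row =>
      (PySem.List.pyRange 0 4 1).mapM (fun j => PySem.List.pyGet? row j)))).map List.flatten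

def isPairWithDiff (mat : List (List Int)) (k : Int) : Bool :=
  match pvCellsA? mat with
  | none => false  -- IndexError; these inputs are outside Pre_
  | some xs =>
    -- first nested loop: s[mat[i][j]] = 1
    let s : PySem.Dict Int Int := xs.foldl (fun d x => d.insert x 1) PySem.Dict.empty
    -- second nested loop with early return: if k + mat[i][j] in s: return True
    xs.any (fun x => s.contains (k + x))

-- ===== PORT B =====
-- Source B's comprehension [mat[i][j] for i in range(N) for j in range(M)]; none = IndexError
def pvCellsB? (mat : List (List Int)) : Option (List Int) :=
  ((PySem.List.pyRange 0 4 1).flatMap (fun i =>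
    (PySem.List.pyRange 0 4 1).map (fun j => (i, j)))).mapM
      (fun ij => (PySem.List.pyGet? mat ij.1).bind (fun row => PySem.List.pyGet? row ij.2))

-- the while loop of Source B, fuel = 2*len(vals) (proved sufficient from i < j)
def pvTwoPtr (v : List Int) (target : Int) : Nat → Nat → Nat → Bool
  | 0, _, _ => false
  | fuel+1, i, j =>
    if j < v.length then
      let d := v.getD j 0 - v.getD i 0   -- indices in range while running (i < j < len)
      if d = target then true
      else if d < target then pvTwoPtr v target fuel i (j+1)
      else if i + 1 = j then pvTwoPtr v target fuel (i+1) (j+1)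
      else pvTwoPtr v target fuel (i+1) j
    else false

def isPairWithDiff_alt (mat : List (List Int)) (k : Int) : Bool :=
  match pvCellsB? mat with
  | none => false  -- IndexError; these inputs are outside Pre_
  | some vals =>
    if k = 0 then true
    else
      let v := PySem.List.sorted vals (fun x => x) false
      pvTwoPtr v |k| (2 * v.length) 0 1

-- ===== PRECONDITION & SPEC =====
-- Pre_ excludes exactly the inputs where A raises IndexError: fewer than 4 rows, or one of the first 4 rows shorter than 4.
def Pre_isPairWithDiff (mat : List (List Int)) (k : Int) : Prop :=
  4 ≤ mat.length ∧ ∀ row ∈ mat.take 4, 4 ≤ row.length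
instance (mat : List (List Int)) (k : Int) : Decidable (Pre_isPairWithDiff mat k) := by
  unfold Pre_isPairWithDiff; infer_instance

def pvWitness_isPairWithDiff : List (List Int) × Int :=
  ([[1,2,3,4],[5,6,7,8],[9,10,11,12],[13,14,15,16]], 3)

def Spec_isPairWithDiff (mat : List (List Int)) (k : Int) (out : Bool) : Prop := out = isPairWithDiff_alt mat k
instance (mat : List (List Int)) (k : Int) (out : Bool) : Decidable (Spec_isPairWithDiff mat k out) := by unfold Spec_isPairWithDiff; infer_instance

-- ===== CLAIM (what is proved, stated in full; the proofs are below) =====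
def Claim_equal_isPairWithDiff : Prop := ∀ (mat : List (List Int)) (k : Int), Dom_isPairWithDiff mat k → Pre_isPairWithDiff mat k → Spec_isPairWithDiff mat k (isPairWithDiff mat k)

-- ===== LEMMAS AND PROOFS =====

-- sorted lists are monotone under getD (in range)
lemma pv_sorted_getD_mono {v : List Int} (hs : v.Pairwise (· ≤ ·)) {p q : Nat}
    (hpq : p ≤ q) (hq : q < v.length) : v.getD p 0 ≤ v.getD q 0 := by
  rcases Nat.lt_or_ge p q with h | h
  · rw [List.getD_eq_getElem v 0 (lt_trans h hq), List.getD_eq_getElem v 0 hq]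
    exact List.pairwise_iff_getElem.mp hs p q _ _ h
  · have : p = q := le_antisymm hpq h
    subst this; exact le_refl _

-- two-pointer sweep finds a pair at distance `target` iff one exists (indices ≥ i, ≥ j)
lemma pvTwoPtr_iff {v : List Int} {t : Int} (hs : v.Pairwise (· ≤ ·)) :
    ∀ fuel i j, i < j → 2 * v.length ≤ i + j + fuel →
    (pvTwoPtr v t fuel i j = true ↔
      ∃ p q, i ≤ p ∧ p < q ∧ j ≤ q ∧ q < v.length ∧ v.getD q 0 - v.getD p 0 = t) := by
  intro fuel
  induction fuel with
  | zero =>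
    intro i j hij hfuel
    simp only [pvTwoPtr]
    constructor
    · intro h; exact absurd h (by simp)
    · rintro ⟨p, q, _, _, hjq, hq, _⟩; omega
  | succ fuel ih =>
    intro i j hij hfuel
    by_cases hj : j < v.length
    · simp only [pvTwoPtr, if_pos hj]
      by_cases hd : v.getD j 0 - v.getD i 0 = t
      · simp only [if_pos hd, true_iff]
        exact ⟨i, j, le_refl i, hij, le_refl j, hj, hd⟩
      · simp only [if_neg hd]
        by_cases hlt : v.getD j 0 - v.getD i 0 < t
        · simp only [if_pos hlt]
          rw [ih i (j+1) (by omega) (by omega)]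
          constructor
          · rintro ⟨p, q, hp, hpq, hq1, hqlen, hdiff⟩
            exact ⟨p, q, hp, hpq, by omega, hqlen, hdiff⟩
          · rintro ⟨p, q, hp, hpq, hq1, hqlen, hdiff⟩
            refine ⟨p, q, hp, hpq, ?_, hqlen, hdiff⟩
            rcases Nat.lt_or_ge q (j+1) with h | h
            · -- q = j; then v[j] - v[p] ≤ v[j] - v[i] < t, contradiction
              have hqj : q = j := by omega
              subst hqj
              have : v.getD i 0 ≤ v.getD p 0 :=
                pv_sorted_getD_mono hs hp (by omega)
              omega
            · exact h
        · simp only [if_neg hlt]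
          have hgt : t < v.getD j 0 - v.getD i 0 := by
            rcases lt_trichotomy (v.getD j 0 - v.getD i 0) t with h | h | h
            · exact absurd h hlt
            · exact absurd h hd
            · exact h
          have hnotpi : ∀ q, j ≤ q → q < v.length → v.getD q 0 - v.getD i 0 ≠ t := by
            intro q hjq hq hdiff
            have : v.getD j 0 ≤ v.getD q 0 := pv_sorted_getD_mono hs hjq hq
            omega
          by_cases hi1 : i + 1 = j
          · simp only [if_pos hi1]
            rw [ih (i+1) (j+1) (by omega) (by omega)]
            constructor
            · rintro ⟨p, q, hp, hpq, hq1, hqlen, hdiff⟩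
              exact ⟨p, q, by omega, hpq, by omega, hqlen, hdiff⟩
            · rintro ⟨p, q, hp, hpq, hq1, hqlen, hdiff⟩
              have hpne : p ≠ i := by
                rintro rfl; exact hnotpi q hq1 hqlen hdiff
              have hqne : q ≠ j := by
                rintro rfl; omega
              exact ⟨p, q, by omega, hpq, by omega, hqlen, hdiff⟩
          · simp only [if_neg hi1]
            rw [ih (i+1) j (by omega) (by omega)]
            constructor
            · rintro ⟨p, q, hp, hpq, hq1, hqlen, hdiff⟩
              exact ⟨p, q, by omega, hpq, hq1, hqlen, hdiff⟩
            · rintro ⟨p, q, hp, hpq, hq1, hqlen, hdiff⟩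
              have hpne : p ≠ i := by
                rintro rfl; exact hnotpi q hq1 hqlen hdiff
              exact ⟨p, q, by omega, hpq, hq1, hqlen, hdiff⟩
    · have hstep : pvTwoPtr v t (fuel+1) i j = false := by
        simp only [pvTwoPtr, if_neg hj]
      rw [hstep]
      constructor
      · intro h; exact absurd h (by simp)
      · rintro ⟨p, q, _, _, hjq, hq, _⟩; omega

-- A's result (after the dict is built) is the plain existential
lemma pv_keyA (xs : List Int) (k : Int) :
    ((xs.any fun x =>
        (xs.foldl (fun d x => d.insert x (1:Int)) PySem.Dict.empty).contains (k + x)) = true)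
    ↔ ∃ x ∈ xs, (k + x) ∈ xs := by
  have hkeys : (xs.foldl (fun d x => d.insert x (1:Int)) PySem.Dict.empty).keys
      = PySem.Set.ofList xs := by
    rw [PySem.Dict.keys_foldl_insert]
    simp [PySem.Set.update, PySem.Set.ofList_eq_foldl, PySem.Dict.keys_empty]
  constructor
  · rintro h
    rcases List.any_eq_true.mp h with ⟨x, hx, hc⟩
    refine ⟨x, hx, ?_⟩
    have := (PySem.Dict.contains_iff_mem_keys _ _).mp hc
    rw [hkeys] at this
    exact (PySem.Set.mem_ofList _ _).mp this
  · rintro ⟨x, hx, hmem⟩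
    refine List.any_eq_true.mpr ⟨x, hx, ?_⟩
    exact (PySem.Dict.contains_iff_mem_keys _ _).mpr
      (by rw [hkeys]; exact (PySem.Set.mem_ofList _ _).mpr hmem)

-- the existential over xs equals "some sorted pair at distance |k|" (for k ≠ 0)
lemma pv_bridge (xs : List Int) (k : Int) (hk : k ≠ 0) :
    (∃ x ∈ xs, (k + x) ∈ xs) ↔
    ∃ p q, 0 ≤ p ∧ p < q ∧ 1 ≤ q ∧ q < (PySem.List.sorted xs (fun x => x) false).length ∧
      (PySem.List.sorted xs (fun x => x) false).getD q 0
        - (PySem.List.sorted xs (fun x => x) false).getD p 0 = |k| := by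
  set v := PySem.List.sorted xs (fun x => x) false with hv
  have hmem : ∀ y : Int, y ∈ v ↔ y ∈ xs := fun y => PySem.List.mem_sorted xs (fun x => x) false y
  have hs : v.Pairwise (· ≤ ·) := PySem.List.sorted_pairwise xs (fun x => x)
  constructor
  · rintro ⟨x, hx, hy⟩
    set a := min x (k + x) with ha
    set b := max x (k + x) with hb
    have hab : a < b := by
      rcases lt_trichotomy k 0 with h | h | h
      · simp only [ha, hb]; omega
      · exact absurd h hk
      · simp only [ha, hb]; omega
    have hdiff : b - a = |k| := by
      rcases abs_cases k with ⟨h1, h2⟩ | ⟨h1, h2⟩ <;> simp only [ha, hb] <;> omega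
    have hav : a ∈ v := (hmem a).mpr (by rcases min_cases x (k+x) with ⟨h, _⟩ | ⟨h, _⟩ <;> rw [ha, h] <;> assumption)
    have hbv : b ∈ v := (hmem b).mpr (by rcases max_cases x (k+x) with ⟨h, _⟩ | ⟨h, _⟩ <;> rw [hb, h] <;> assumption)
    rcases List.mem_iff_getElem.mp hav with ⟨p, hp, hpa⟩
    rcases List.mem_iff_getElem.mp hbv with ⟨q, hq, hqb⟩
    have hga : v.getD p 0 = a := by rw [List.getD_eq_getElem v 0 hp, hpa]
    have hgb : v.getD q 0 = b := by rw [List.getD_eq_getElem v 0 hq, hqb]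
    have hpq : p < q := by
      rcases Nat.lt_or_ge p q with h | h
      · exact h
      · exfalso
        have := pv_sorted_getD_mono hs h hp
        rw [hga, hgb] at this; omega
    exact ⟨p, q, Nat.zero_le p, hpq, by omega, hq, by rw [hga, hgb]; exact hdiff⟩
  · rintro ⟨p, q, _, hpq, _, hq, hdiff⟩
    have hp : p < v.length := lt_trans hpq hq
    have hpa : v.getD p 0 ∈ xs := (hmem _).mp (by rw [List.getD_eq_getElem v 0 hp]; exact List.getElem_mem hp)
    have hqb : v.getD q 0 ∈ xs := (hmem _).mp (by rw [List.getD_eq_getElem v 0 hq]; exact List.getElem_mem hq)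
    rcases abs_cases k with ⟨h1, h2⟩ | ⟨h1, h2⟩
    · exact ⟨v.getD p 0, hpa, by have : k + v.getD p 0 = v.getD q 0 := by omega
                                 rw [this]; exact hqb⟩
    · exact ⟨v.getD q 0, hqb, by have : k + v.getD q 0 = v.getD p 0 := by omega
                                 rw [this]; exact hpa⟩

-- main equality on the flattened cell list
lemma pv_mainEq (xs : List Int) (k : Int) (hne : xs ≠ []) :
    (xs.any fun x =>
        (xs.foldl (fun d x => d.insert x (1:Int)) PySem.Dict.empty).contains (k + x))
    = (if k = 0 then true
       else pvTwoPtr (PySem.List.sorted xs (fun x => x) false) |k|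
            (2 * (PySem.List.sorted xs (fun x => x) false).length) 0 1) := by
  by_cases hk : k = 0
  · subst hk
    rw [if_pos rfl]
    rcases xs with _ | ⟨x, t⟩
    · exact absurd rfl hne
    · exact (pv_keyA (x :: t) 0).mpr ⟨x, List.mem_cons_self, by simp⟩
  · rw [if_neg hk, Bool.eq_iff_iff, pv_keyA,
      pvTwoPtr_iff (PySem.List.sorted_pairwise xs (fun x => x)) _ 0 1
        (by omega) (by omega),
      pv_bridge xs k hk]

-- ===== VERDICT (by name: the statement is the Claim_ definition above) =====
theorem isPairWithDiff_spec : Claim_equal_isPairWithDiff := by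
  intro mat k _ hpre
  unfold Spec_isPairWithDiff
  obtain ⟨hlen, hrows⟩ := hpre
  rcases mat with _ | ⟨r0, mat⟩; · simp at hlen
  rcases mat with _ | ⟨r1, mat⟩; · simp at hlen
  rcases mat with _ | ⟨r2, mat⟩; · simp at hlen
  rcases mat with _ | ⟨r3, t⟩; · simp at hlen
  have h0 : 4 ≤ r0.length := hrows r0 (by simp)
  have h1 : 4 ≤ r1.length := hrows r1 (by simp)
  have h2 : 4 ≤ r2.length := hrows r2 (by simp)
  have h3 : 4 ≤ r3.length := hrows r3 (by simp)
  rcases r0 with _ | ⟨a0, _ | ⟨a1, _ | ⟨a2, _ | ⟨a3, ta⟩⟩⟩⟩ <;> simp at h0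
  rcases r1 with _ | ⟨b0, _ | ⟨b1, _ | ⟨b2, _ | ⟨b3, tb⟩⟩⟩⟩ <;> simp at h1
  rcases r2 with _ | ⟨c0, _ | ⟨c1, _ | ⟨c2, _ | ⟨c3, tc⟩⟩⟩⟩ <;> simp at h2
  rcases r3 with _ | ⟨d0, _ | ⟨d1, _ | ⟨d2, _ | ⟨d3, td⟩⟩⟩⟩ <;> simp at h3
  have hcells : pvCellsA? ((a0::a1::a2::a3::ta) :: (b0::b1::b2::b3::tb) ::
      (c0::c1::c2::c3::tc) :: (d0::d1::d2::d3::td) :: t)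
      = some [a0,a1,a2,a3,b0,b1,b2,b3,c0,c1,c2,c3,d0,d1,d2,d3] := by
    simp [pvCellsA?, PySem.List.pyRange, List.range_succ, List.mapM, List.mapM.loop, PySem.List.pyGet?_of_nonneg]
  have hvals : pvCellsB? ((a0::a1::a2::a3::ta) :: (b0::b1::b2::b3::tb) ::
      (c0::c1::c2::c3::tc) :: (d0::d1::d2::d3::td) :: t)
      = some [a0,a1,a2,a3,b0,b1,b2,b3,c0,c1,c2,c3,d0,d1,d2,d3] := by
    simp [pvCellsB?, PySem.List.pyRange, List.range_succ, List.mapM, List.mapM.loop, PySem.List.pyGet?_of_nonneg]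
  simp only [isPairWithDiff, isPairWithDiff_alt, hcells, hvals]
  exact pv_mainEq _ k (by simp)
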